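-- pv_equiv track=rewrite | github.com/adityaj2003/Chessboard-Recognition | recognizeBoard.py | filter_close_lines
-- ===== SOURCE A (Python) =====
-- def filter_close_lines(lines, threshold=150):
--     lines = sorted(lines, key=lambda x: x[0])
--
--     filtered_lines = []
--     current_group = [lines[0]]
--
--     for line in lines[1:]:
--         if abs(line[0] - current_group[-1][0]) <= threshold:
--             current_group.append(line)
--         else:
--             # Choose 1 line from many close lines
--             representative_line = sorted(current_group, key=lambda x: x[0])[len(current_group) // 2]
--             filtered_lines.append(representative_line)
--             current_group = [line]
--
--     # Add the selected line from the last group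
--     if current_group:
--         representative_line = sorted(current_group, key=lambda x: x[0])[len(current_group) // 2]
--         filtered_lines.append(representative_line)
--
--     return filtered_lines
-- ===== SOURCE B (Python) =====
-- def filter_close_lines(lines, threshold=150):
--     s = sorted(lines, key=lambda x: x[0])
--     out = []
--     while s:
--         # length of the maximal run chained by adjacent gaps <= threshold
--         k = 1
--         while k < len(s) and abs(s[k][0] - s[k - 1][0]) <= threshold:
--             k += 1
--         out.append(s[k // 2])  # median of the run, picked by index
--         s = s[k:]
--     return out
-- ===== Notes on version B (the rewrite author's own statement) =====
-- stated objective: simpler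
-- what changed: A accumulates a running current_group list and re-sorts each finished group to pick its median with a final flush step; B peels each maximal adjacent-threshold run off the sorted list with an index scan and picks the run's median directly by index, materialising no groups and never re-sorting.
import Mathlib
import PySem

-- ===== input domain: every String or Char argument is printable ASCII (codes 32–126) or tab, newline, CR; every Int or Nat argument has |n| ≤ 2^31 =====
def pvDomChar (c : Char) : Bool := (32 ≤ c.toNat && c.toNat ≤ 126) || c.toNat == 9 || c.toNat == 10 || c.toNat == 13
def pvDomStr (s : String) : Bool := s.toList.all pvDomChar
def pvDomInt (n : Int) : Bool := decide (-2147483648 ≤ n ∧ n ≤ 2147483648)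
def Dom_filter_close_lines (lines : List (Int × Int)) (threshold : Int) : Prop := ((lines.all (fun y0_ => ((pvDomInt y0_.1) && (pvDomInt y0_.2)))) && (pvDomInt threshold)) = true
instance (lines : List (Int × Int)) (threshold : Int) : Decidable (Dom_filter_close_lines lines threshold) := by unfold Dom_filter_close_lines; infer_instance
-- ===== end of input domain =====

-- B replaces A's running-group accumulator (and its redundant per-group re-sort) by peeling
-- off each maximal adjacent-threshold run of the sorted list and picking its median by index
-- (objective: simpler — no group lists are materialised and no inner sort is performed).

-- ===== PORT A =====
-- representative_line = sorted(current_group, key=lambda x: x[0])[len(current_group) // 2]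
def pvRepA (g : List (Int × Int)) : Int × Int :=
  PySem.List.pyGetD (PySem.List.sorted g (fun x => x.1) false) ((g.length / 2 : Nat) : Int) (0, 0)

-- body of A's for-loop over the state (filtered_lines, current_group)
def pvStepA (threshold : Int) (st : List (Int × Int) × List (Int × Int)) (line : Int × Int) :
    List (Int × Int) × List (Int × Int) :=
  if |line.1 - (PySem.List.pyGetD st.2 (-1) (0, 0)).1| ≤ threshold then
    (st.1, st.2 ++ [line])
  else
    (st.1 ++ [pvRepA st.2], [line])

def filter_close_lines (lines : List (Int × Int)) (threshold : Int) : List (Int × Int) :=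
  let s := PySem.List.sorted lines (fun x => x.1) false
  match PySem.List.pyGet? s 0 with
  | none => []   -- lines[0] raises IndexError here; excluded by Pre_
  | some first =>
    let st := (PySem.List.slice s (some 1) none).foldl (pvStepA threshold) ([], [first])
    if st.2 ≠ [] then st.1 ++ [pvRepA st.2] else st.1

-- ===== PORT B =====
-- inner while: number of further elements chained to `prev` by gaps ≤ threshold
def pvChainLen (threshold : Int) (prev : Int) : List (Int × Int) → Nat
  | [] => 0
  | y :: ys => if |y.1 - prev| ≤ threshold then 1 + pvChainLen threshold y.1 ys else 0

-- outer while: emit the median of the first run, continue on the rest of the list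
def pvGoB (threshold : Int) : List (Int × Int) → List (Int × Int)
  | [] => []
  | x :: xs =>
    let c := pvChainLen threshold x.1 xs
    PySem.List.pyGetD (x :: xs) (((1 + c) / 2 : Nat) : Int) (0, 0) :: pvGoB threshold (xs.drop c)
  termination_by l => l.length
  decreasing_by simp

def filter_close_lines_alt (lines : List (Int × Int)) (threshold : Int) : List (Int × Int) :=
  pvGoB threshold (PySem.List.sorted lines (fun x => x.1) false)

-- ===== PRECONDITION & SPEC =====
-- A indexes lines[0] after sorting, so it raises IndexError exactly on the empty list.
def Pre_filter_close_lines (lines : List (Int × Int)) (threshold : Int) : Prop := lines ≠ []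
instance (lines : List (Int × Int)) (threshold : Int) : Decidable (Pre_filter_close_lines lines threshold) := by unfold Pre_filter_close_lines; infer_instance
def pvWitness_filter_close_lines : (List (Int × Int)) × Int := ([(0, 1), (300, 2), (10, 3)], 150)

def Spec_filter_close_lines (lines : List (Int × Int)) (threshold : Int) (out : List (Int × Int)) : Prop := out = filter_close_lines_alt lines threshold
instance (lines : List (Int × Int)) (threshold : Int) (out : List (Int × Int)) : Decidable (Spec_filter_close_lines lines threshold out) := by unfold Spec_filter_close_lines; infer_instance

-- ===== CLAIM (what is proved, stated in full; the proofs are below) =====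
def Claim_equal_filter_close_lines : Prop := ∀ (lines : List (Int × Int)) (threshold : Int), Dom_filter_close_lines lines threshold → Pre_filter_close_lines lines threshold → Spec_filter_close_lines lines threshold (filter_close_lines lines threshold)

-- ===== LEMMAS AND PROOFS =====

-- fst of the last element of (p, _) :: gt — B's threaded `prev` after consuming gt
def pvLastFst (p : Int) : List (Int × Int) → Int
  | [] => p
  | y :: ys => pvLastFst y.1 ys

theorem pvLastFst_getLast (p d : Int) :
    ∀ (gt : List (Int × Int)), pvLastFst p gt = (((p, d) :: gt).getLast (by simp)).1 := by
  intro gt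
  induction gt generalizing p d with
  | nil => rfl
  | cons y ys ih =>
    show pvLastFst y.1 ys = _
    rw [List.getLast_cons (by simp)]
    rcases y with ⟨y1, y2⟩
    exact ih y1 y2

-- B's inner scan first consumes a fully-chained prefix, then continues from its last fst
theorem pvChainLen_append (t : Int) :
    ∀ (gt : List (Int × Int)) (p : Int) (rest : List (Int × Int)),
      pvChainLen t p gt = gt.length →
      pvChainLen t p (gt ++ rest) = gt.length + pvChainLen t (pvLastFst p gt) rest := by
  intro gt
  induction gt with
  | nil => intro p rest _; simp [pvLastFst]
  | cons y ys ih =>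
    intro p rest h
    by_cases hc : |y.1 - p| ≤ t
    · simp only [pvChainLen, hc, if_true, List.length_cons] at h ⊢
      have h' : pvChainLen t y.1 ys = ys.length := by omega
      rw [List.cons_append]
      simp only [pvChainLen, hc, if_true, pvLastFst]
      rw [ih y.1 rest h']
      omega
    · simp [pvChainLen, hc] at h

-- A's inner re-sort of an already fst-sorted group is the identity
theorem pvRepA_sorted (g : List (Int × Int))
    (hs : List.Pairwise (fun a b : Int × Int => a.1 ≤ b.1) g) :
    pvRepA g = PySem.List.pyGetD g ((g.length / 2 : Nat) : Int) (0, 0) := by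
  unfold pvRepA
  exact congrArg (fun l => PySem.List.pyGetD l ((g.length / 2 : Nat) : Int) (0, 0))
    (PySem.List.sorted_eq_self_of_pairwise g (fun x => x.1) hs)

-- main invariant: A's loop from state (acc, h :: gt), followed by the final flush,
-- equals acc ++ B's run-splitting pass over (h :: gt) ++ xs, provided the whole list
-- is fst-sorted and the current group h :: gt is one chained run
theorem pvMain (t : Int) :
    ∀ (xs : List (Int × Int)) (acc : List (Int × Int)) (h : Int × Int) (gt : List (Int × Int)),
      List.Pairwise (fun a b : Int × Int => a.1 ≤ b.1) ((h :: gt) ++ xs) →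
      pvChainLen t h.1 gt = gt.length →
      (let st := xs.foldl (pvStepA t) (acc, h :: gt)
       if st.2 ≠ [] then st.1 ++ [pvRepA st.2] else st.1) =
        acc ++ pvGoB t ((h :: gt) ++ xs) := by
  intro xs
  induction xs with
  | nil =>
    intro acc h gt hp hc
    simp only [List.foldl_nil, List.append_nil] at *
    rw [if_pos (by simp), pvGoB]
    simp only [hc, List.drop_length, pvGoB, pvRepA_sorted _ hp]
    have : (1 + gt.length) / 2 = (h :: gt).length / 2 := by simp; omega
    rw [this]
  | cons y ys ih =>
    intro acc h gt hp hc
    simp only [List.foldl_cons]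
    have hL : (PySem.List.pyGetD (h :: gt) (-1) (0, 0)).1 = pvLastFst h.1 gt := by
      rw [PySem.List.pyGetD_neg_one (h :: gt) (0, 0) (by simp)]
      rcases h with ⟨h1, h2⟩
      exact (pvLastFst_getLast h1 h2 gt).symm
    by_cases hcnd : |y.1 - pvLastFst h.1 gt| ≤ t
    · have hstep : pvStepA t (acc, h :: gt) y = (acc, h :: (gt ++ [y])) := by
        simp [pvStepA, hL, hcnd]
      rw [hstep]
      have hp' : List.Pairwise (fun a b : Int × Int => a.1 ≤ b.1) ((h :: (gt ++ [y])) ++ ys) := by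
        simpa [List.append_assoc] using hp
      have hc' : pvChainLen t h.1 (gt ++ [y]) = (gt ++ [y]).length := by
        rw [pvChainLen_append t gt h.1 [y] hc]
        simp [pvChainLen, hcnd]
      have := ih acc h (gt ++ [y]) hp' hc'
      simpa [List.append_assoc] using this
    · have hstep : pvStepA t (acc, h :: gt) y = (acc ++ [pvRepA (h :: gt)], [y]) := by
        simp [pvStepA, hL, hcnd]
      rw [hstep]
      have hpg : List.Pairwise (fun a b : Int × Int => a.1 ≤ b.1) (h :: gt) :=
        hp.sublist (List.sublist_append_left _ _)
      have hpy : List.Pairwise (fun a b : Int × Int => a.1 ≤ b.1) ((y :: []) ++ ys) :=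
        hp.sublist (List.sublist_append_right _ _)
      have := ih (acc ++ [pvRepA (h :: gt)]) y [] hpy rfl
      rw [this]
      have hcfull : pvChainLen t h.1 (gt ++ y :: ys) = gt.length := by
        rw [pvChainLen_append t gt h.1 (y :: ys) hc]
        simp [pvChainLen, hcnd]
      rw [show ((h :: gt) ++ y :: ys) = h :: (gt ++ y :: ys) by simp]
      rw [pvGoB]
      simp only [hcfull, List.drop_left]
      have hidx : PySem.List.pyGetD (h :: (gt ++ y :: ys)) (((1 + gt.length) / 2 : Nat) : Int) (0, 0)
          = pvRepA (h :: gt) := by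
        rw [pvRepA_sorted _ hpg]
        rw [show ((1 + gt.length : Nat)) = (h :: gt).length by simp [Nat.add_comm]]
        rw [PySem.List.pyGetD_natCast, PySem.List.pyGetD_natCast]
        rw [show (h :: (gt ++ y :: ys)) = (h :: gt) ++ (y :: ys) by simp]
        rw [List.getD_eq_getElem?_getD, List.getD_eq_getElem?_getD]
        rw [List.getElem?_append_left (by simp; omega)]
      rw [hidx]
      simp [List.append_assoc]

-- ===== VERDICT (by name: the statement is the Claim_ definition above) =====
theorem filter_close_lines_spec : Claim_equal_filter_close_lines := by
  intro lines t _ hpre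
  unfold Spec_filter_close_lines filter_close_lines filter_close_lines_alt
  have hlen : (PySem.List.sorted lines (fun x => x.1) false).length = lines.length :=
    (PySem.List.sorted_perm lines _ _).length_eq
  have hsne : PySem.List.sorted lines (fun x => x.1) false ≠ [] := by
    intro h0; apply hpre; rw [h0] at hlen; exact List.eq_nil_of_length_eq_zero hlen.symm
  rcases hs : PySem.List.sorted lines (fun x => x.1) false with _ | ⟨m, rest⟩
  · exact absurd hs hsne
  · simp only [PySem.List.pyGet?_zero_cons, PySem.List.slice_from_one, List.tail_cons]
    have hp : List.Pairwise (fun a b : Int × Int => a.1 ≤ b.1) ((m :: []) ++ rest) := by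
      have := PySem.List.sorted_pairwise lines (fun x : Int × Int => x.1)
      rw [hs] at this; simpa using this
    have := pvMain t rest [] m [] (by simpa using hp) rfl
    simpa using this
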